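-- pv_equiv track=rewrite | github.com/tflovorn/displ | displ/build/build.py | get_wann_valence
-- ===== SOURCE A (Python) =====
-- def get_wann_valence(at_syms, soc=True):
--     Ms = ["Mo", "W"]
--     Xs = ["S", "Se", "Te"]
--
--     # num_wann should equal nspin*(nlayers*9 + 2*nlayers*6)
--     num_wann = 0
--
--     wann_valence = {}
--     for sym in at_syms:
--         if sym in Ms:
--             if soc:
--                 num_wann += 10
--             else:
--                 num_wann += 5
--
--             wann_valence[sym] = ["d"]
--         else:
--             if soc:
--                 num_wann += 6
--             else:
--                 num_wann += 3
--
--             wann_valence[sym] = ["p"]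
--
--     return wann_valence, num_wann
-- ===== SOURCE B (Python) =====
-- def get_wann_valence(at_syms, soc=True):
--     Ms = ["Mo", "W"]
--     counts = {}
--     for sym in at_syms:
--         counts[sym] = counts.get(sym, 0) + 1
--     wann_valence = {sym: (["d"] if sym in Ms else ["p"]) for sym in counts}
--     num_wann = sum(c * ((10 if soc else 5) if sym in Ms else (6 if soc else 3))
--                    for sym, c in counts.items())
--     return wann_valence, num_wann
-- ===== Notes on version B (the rewrite author's own statement) =====
-- stated objective: alternative
-- what changed: B first builds a frequency table of the symbols in one pass, then constructs wann_valence by a comprehension over the distinct keys and computes num_wann as a count-weighted sum over the distinct keys, instead of A's single loop that classifies and accumulates per occurrence.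
import Mathlib
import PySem

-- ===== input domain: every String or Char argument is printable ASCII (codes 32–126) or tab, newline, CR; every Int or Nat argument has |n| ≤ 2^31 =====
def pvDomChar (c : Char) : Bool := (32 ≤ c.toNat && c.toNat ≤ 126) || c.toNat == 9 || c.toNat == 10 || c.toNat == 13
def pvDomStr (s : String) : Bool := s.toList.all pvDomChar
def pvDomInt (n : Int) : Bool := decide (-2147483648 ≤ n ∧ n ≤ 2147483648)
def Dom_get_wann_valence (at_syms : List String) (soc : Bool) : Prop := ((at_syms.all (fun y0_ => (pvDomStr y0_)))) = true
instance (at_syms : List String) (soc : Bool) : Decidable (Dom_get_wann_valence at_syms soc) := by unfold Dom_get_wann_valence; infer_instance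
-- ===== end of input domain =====

-- B replaces A's per-occurrence classify-and-accumulate loop by a frequency table over the
-- distinct symbols followed by a comprehension and a count-weighted sum (alternative decomposition).

-- ===== PORT A =====
def get_wann_valence (at_syms : List String) (soc : Bool) : (List (String × List String)) × Int :=
  let Ms : List String := ["Mo", "W"]
  let res := at_syms.foldl
    (fun st sym =>
      if sym ∈ Ms then
        (st.1.insert sym ["d"], st.2 + (if soc then 10 else 5))
      else
        (st.1.insert sym ["p"], st.2 + (if soc then 6 else 3)))
    ((PySem.Dict.empty : PySem.Dict String (List String)), (0 : Int))
  (res.1.items, res.2)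

-- ===== PORT B =====
def get_wann_valence_alt (at_syms : List String) (soc : Bool) : (List (String × List String)) × Int :=
  let Ms : List String := ["Mo", "W"]
  let counts : PySem.Dict String Int :=
    at_syms.foldl (fun d sym => d.insert sym (d.getD sym 0 + 1)) PySem.Dict.empty
  let wann_valence := counts.keys.map (fun sym => (sym, if sym ∈ Ms then ["d"] else ["p"]))
  let num_wann := counts.items.foldl
    (fun acc p => acc + p.2 * (if p.1 ∈ Ms then (if soc then (10 : Int) else 5) else (if soc then 6 else 3))) 0
  (wann_valence, num_wann)

-- ===== PRECONDITION & SPEC =====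
def Spec_get_wann_valence (at_syms : List String) (soc : Bool) (out : (List (String × List String)) × Int) : Prop := out = get_wann_valence_alt at_syms soc
instance (at_syms : List String) (soc : Bool) (out : (List (String × List String)) × Int) : Decidable (Spec_get_wann_valence at_syms soc out) := by unfold Spec_get_wann_valence; infer_instance

-- ===== CLAIM (what is proved, stated in full; the proofs are below) =====
def Claim_equal_get_wann_valence : Prop := ∀ (at_syms : List String) (soc : Bool), Dom_get_wann_valence at_syms soc → Spec_get_wann_valence at_syms soc (get_wann_valence at_syms soc)

-- ===== LEMMAS AND PROOFS =====

-- A's paired fold splits into two independent folds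
theorem foldl_prod_split {α β γ : Type} (f : β → α → β) (g : γ → α → γ)
    (l : List α) (b : β) (c : γ) :
    l.foldl (fun st x => (f st.1 x, g st.2 x)) (b, c) = (l.foldl f b, l.foldl g c) := by
  induction l generalizing b c with
  | nil => rfl
  | cons a l ih => simpa using ih (f b a) (g c a)

-- inserting a value that depends only on the key: lookup of the result
theorem getD_foldl_insert_fn (g : String → List String) (l : List String)
    (d : PySem.Dict String (List String)) (k : String) (dflt : List String) :
    (l.foldl (fun d x => d.insert x (g x)) d).getD k dflt
      = if k ∈ l then g k else d.getD k dflt := by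
  induction l generalizing d with
  | nil => simp
  | cons a l ih =>
    simp only [List.foldl_cons, ih, List.mem_cons]
    by_cases hl : k ∈ l
    · simp [hl]
    · by_cases ha : k = a
      · simp [ha, PySem.Dict.getD_insert_self]
      · simp [hl, ha, PySem.Dict.getD_insert]

theorem toFinset_ofList {α : Type} [DecidableEq α] (xs : List α) :
    (PySem.Set.ofList xs).toFinset = xs.toFinset := by
  ext x; simp [PySem.Set.mem_ofList]

-- the count-weighted sum over distinct symbols equals the per-occurrence sum
theorem sum_weighted (xs : List String) (w : String → Int) :
    (xs.map w).sum = ((PySem.Set.ofList xs).map (fun k => (xs.count k : Int) * w k)).sum := by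
  rw [Finset.sum_list_map_count xs w]
  rw [← List.sum_toFinset _ (PySem.Set.nodup_ofList xs), toFinset_ofList]
  exact Finset.sum_congr rfl (fun m _ => by simp)

-- ===== VERDICT (by name: the statement is the Claim_ definition above) =====
theorem get_wann_valence_spec : Claim_equal_get_wann_valence := by
  intro xs soc _
  unfold Spec_get_wann_valence get_wann_valence get_wann_valence_alt
  dsimp only
  have hf : (fun (st : PySem.Dict String (List String) × Int) (sym : String) =>
      if sym ∈ ["Mo", "W"] then
        (st.1.insert sym ["d"], st.2 + (if soc then 10 else 5))
      else
        (st.1.insert sym ["p"], st.2 + (if soc then 6 else 3)))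
    = fun st sym =>
      ((fun (d : PySem.Dict String (List String)) (sym : String) =>
          d.insert sym (if sym ∈ ["Mo","W"] then ["d"] else ["p"])) st.1 sym,
       (fun (n : Int) (sym : String) =>
          n + (if sym ∈ ["Mo","W"] then (if soc then (10:Int) else 5) else (if soc then 6 else 3))) st.2 sym) := by
    funext st sym; by_cases h : sym ∈ (["Mo","W"] : List String) <;> simp [h]
  rw [hf, foldl_prod_split
    (fun (d : PySem.Dict String (List String)) (sym : String) =>
        d.insert sym (if sym ∈ ["Mo","W"] then ["d"] else ["p"]))
    (fun (n : Int) (sym : String) =>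
        n + (if sym ∈ ["Mo","W"] then (if soc then (10:Int) else 5) else (if soc then 6 else 3)))]
  have hcounter : xs.foldl (fun (d : PySem.Dict String Int) sym => d.insert sym (d.getD sym 0 + 1)) PySem.Dict.empty = PySem.Dict.counter xs :=
    PySem.Dict.foldl_insert_getD_add_one_eq_counter xs
  refine Prod.ext ?_ ?_
  · -- the dict components agree
    have hnd : (xs.foldl (fun (d : PySem.Dict String (List String)) x => d.insert x (if x ∈ (["Mo","W"] : List String) then ["d"] else ["p"])) PySem.Dict.empty).keys.Nodup :=
      PySem.Dict.nodup_keys_foldl_insert _ _ _ (by simp)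
    rw [PySem.Dict.items_eq_map_keys _ hnd []]
    rw [PySem.Dict.keys_foldl_insert]
    simp only [hcounter, PySem.Dict.keys_counter, PySem.Dict.keys_empty,
      PySem.Set.update_nil_left]
    apply List.map_congr_left
    intro k hk
    rw [getD_foldl_insert_fn]
    simp [(PySem.Set.mem_ofList _ _).mp hk]
  · -- the numeric components agree
    simp only [hcounter, PySem.List.foldl_add, PySem.Dict.items_counter, List.map_map, zero_add]
    exact sum_weighted xs _
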